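-- pv_equiv track=rewrite | github.com/Convergent-Sequence/n-ary-topology | ntop.py | usual_interior
-- ===== SOURCE A (Python) =====
-- from itertools import chain, combinations, product
--
-- def power_set(s:set):
--     return list(set(x) for x in chain.from_iterable(combinations(s, r) for r in range(len(s) + 1)))
--
-- def usual_interior(z, tau, s):
--     interior = []
--     for elementp in power_set(z):
--         if elementp.issubset(s) and elementp in tau:
--             interior.append(elementp)
--     if not interior:
--         return set()  # Return the empty set if interior is empty
--     return set.union(*interior)
-- ===== SOURCE B (Python) =====
-- def usual_interior(z, tau, s):
--     interior = set()
--     for t in tau: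
--         if t <= z and t <= s:
--             interior |= t
--     return interior
-- ===== Notes on version B (the rewrite author's own statement) =====
-- stated objective: faster
-- what changed: B unions the members of tau that are subsets of both z and s in one pass over tau, instead of enumerating the entire power set of z and testing each subset for membership in tau.
import Mathlib
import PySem

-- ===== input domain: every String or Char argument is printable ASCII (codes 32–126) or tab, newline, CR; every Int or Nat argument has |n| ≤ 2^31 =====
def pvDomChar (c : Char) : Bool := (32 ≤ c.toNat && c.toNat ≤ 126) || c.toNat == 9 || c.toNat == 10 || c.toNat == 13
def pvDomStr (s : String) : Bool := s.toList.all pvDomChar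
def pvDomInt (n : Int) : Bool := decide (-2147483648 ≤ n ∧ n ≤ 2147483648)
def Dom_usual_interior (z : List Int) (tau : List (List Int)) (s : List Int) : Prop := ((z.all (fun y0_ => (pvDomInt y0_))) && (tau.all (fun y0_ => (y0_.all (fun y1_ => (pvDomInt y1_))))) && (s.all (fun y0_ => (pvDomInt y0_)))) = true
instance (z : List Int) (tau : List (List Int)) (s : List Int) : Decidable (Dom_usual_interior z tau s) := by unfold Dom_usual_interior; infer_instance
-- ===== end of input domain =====

-- B replaces A's power-set enumeration by a single pass over tau (asymptotically faster).
-- Both Pythons return a SET; set iteration order is not modelled, so each port returns the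
-- computed set as its sorted element list (a canonical representative; compared as a set).

-- ===== PORT A =====
-- power_set(z): chain(combinations(z, r) for r in range(len(z)+1)), each tuple made a set
def pvPowerSet (z : List Int) : List (PySem.Set Int) :=
  (List.range (z.length + 1)).flatMap (fun r => (List.sublistsLen r z).map PySem.Set.ofList)

def usual_interior (z : List Int) (tau : List (List Int)) (s : List Int) : List Int :=
  -- interior = [p for p in power_set(z) if p.issubset(s) and p in tau]
  match (pvPowerSet z).filter
      (fun p => PySem.Set.issubset p s && tau.any (fun t => PySem.Set.equal p t)) with
  | [] => []                                         -- if not interior: return set()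
  | h :: rest =>                                     -- return set.union(*interior)
      PySem.List.sorted (rest.foldl PySem.Set.union h) (fun x => x) false

-- ===== PORT B =====
def usual_interior_alt (z : List Int) (tau : List (List Int)) (s : List Int) : List Int :=
  PySem.List.sorted
    (tau.foldl
      (fun out t =>
        if PySem.Set.issubset t z && PySem.Set.issubset t s then PySem.Set.union out t else out)
      PySem.Set.empty)
    (fun x => x) false

-- ===== PRECONDITION & SPEC =====
def Spec_usual_interior (z : List Int) (tau : List (List Int)) (s : List Int) (out : List Int) : Prop := out = usual_interior_alt z tau s
instance (z : List Int) (tau : List (List Int)) (s : List Int) (out : List Int) : Decidable (Spec_usual_interior z tau s out) := by unfold Spec_usual_interior; infer_instance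

-- ===== CLAIM (what is proved, stated in full; the proofs are below) =====
def Claim_equal_usual_interior : Prop := ∀ (z : List Int) (tau : List (List Int)) (s : List Int), Dom_usual_interior z tau s → Spec_usual_interior z tau s (usual_interior z tau s)

-- ===== LEMMAS AND PROOFS =====

-- membership in A's union fold
theorem pv_mem_foldl_union (l : List (PySem.Set Int)) (acc : PySem.Set Int) (x : Int) :
    x ∈ l.foldl PySem.Set.union acc ↔ x ∈ acc ∨ ∃ p ∈ l, x ∈ p := by
  induction l generalizing acc with
  | nil => simp
  | cons p l ih =>
      simp [List.foldl_cons, ih, PySem.Set.mem_union]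
      tauto

theorem pv_nodup_foldl_union (l : List (PySem.Set Int)) (acc : PySem.Set Int)
    (h : acc.Nodup) : (l.foldl PySem.Set.union acc).Nodup := by
  induction l generalizing acc with
  | nil => exact h
  | cons p l ih => exact ih _ (PySem.Set.nodup_union _ _ h)

-- membership in B's fold
theorem pv_mem_foldl_B (z s : List Int) (tau : List (List Int)) (acc : PySem.Set Int) (x : Int) :
    x ∈ tau.foldl
        (fun out t =>
          if PySem.Set.issubset t z && PySem.Set.issubset t s then PySem.Set.union out t else out)
        acc
      ↔ x ∈ acc ∨ ∃ t ∈ tau,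
          (PySem.Set.issubset t z && PySem.Set.issubset t s) = true ∧ x ∈ t := by
  induction tau generalizing acc with
  | nil => simp
  | cons t tau ih =>
      by_cases hc : (PySem.Set.issubset t z && PySem.Set.issubset t s) = true
      · rw [List.foldl_cons, if_pos hc, ih, PySem.Set.mem_union,
          List.exists_mem_cons_iff]
        tauto
      · rw [List.foldl_cons, if_neg hc, ih, List.exists_mem_cons_iff]
        tauto

theorem pv_nodup_foldl_B (z s : List Int) (tau : List (List Int)) (acc : PySem.Set Int)
    (h : acc.Nodup) :
    (tau.foldl
        (fun out t =>
          if PySem.Set.issubset t z && PySem.Set.issubset t s then PySem.Set.union out t else out)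
        acc).Nodup := by
  induction tau generalizing acc with
  | nil => exact h
  | cons t tau ih =>
      dsimp only [List.foldl_cons]
      split
      · exact ih _ (PySem.Set.nodup_union _ _ h)
      · exact ih _ h

-- characterisation of pvPowerSet membership
theorem pv_mem_powerSet (z : List Int) (p : PySem.Set Int) :
    p ∈ pvPowerSet z ↔ ∃ c : List Int, c.Sublist z ∧ p = PySem.Set.ofList c := by
  unfold pvPowerSet
  simp only [List.mem_flatMap, List.mem_map, List.mem_range, List.mem_sublistsLen]
  constructor
  · rintro ⟨r, _, c, ⟨hsub, _⟩, rfl⟩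
    exact ⟨c, hsub, rfl⟩
  · rintro ⟨c, hsub, rfl⟩
    exact ⟨c.length, by have := hsub.length_le; omega, c, ⟨hsub, rfl⟩, rfl⟩

-- the two programs collect the same elements
theorem pv_interior_mem_iff (z : List Int) (tau : List (List Int)) (s : List Int) (x : Int) :
    (∃ p ∈ (pvPowerSet z).filter
        (fun p => PySem.Set.issubset p s && tau.any (fun t => PySem.Set.equal p t)), x ∈ p)
      ↔ ∃ t ∈ tau, (PySem.Set.issubset t z && PySem.Set.issubset t s) = true ∧ x ∈ t := by
  constructor
  · rintro ⟨p, hp, hx⟩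
    rw [List.mem_filter] at hp
    obtain ⟨hps, hc⟩ := hp
    rw [Bool.and_eq_true] at hc
    obtain ⟨hsub_s, hany⟩ := hc
    rw [List.any_eq_true] at hany
    obtain ⟨t, ht, heq⟩ := hany
    obtain ⟨c, hcz, rfl⟩ := (pv_mem_powerSet z p).1 hps
    rw [PySem.Set.equal_iff] at heq
    refine ⟨t, ht, ?_, ?_⟩
    · rw [Bool.and_eq_true, PySem.Set.issubset_iff, PySem.Set.issubset_iff]
      constructor
      · intro y hy
        have : y ∈ PySem.Set.ofList c := (heq y).2 hy
        rw [PySem.Set.mem_ofList] at this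
        exact hcz.subset this
      · intro y hy
        exact (PySem.Set.issubset_iff _ _).1 hsub_s y ((heq y).2 hy)
    · exact (heq x).1 hx
  · rintro ⟨t, ht, hc, hx⟩
    rw [Bool.and_eq_true, PySem.Set.issubset_iff, PySem.Set.issubset_iff] at hc
    obtain ⟨htz, hts⟩ := hc
    refine ⟨PySem.Set.ofList (z.filter (fun a => decide (a ∈ t))), ?_, ?_⟩
    · rw [List.mem_filter]
      constructor
      · exact (pv_mem_powerSet z _).2 ⟨_, List.filter_sublist, rfl⟩
      · rw [Bool.and_eq_true]
        constructor
        · rw [PySem.Set.issubset_iff]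
          intro y hy
          rw [PySem.Set.mem_ofList, List.mem_filter] at hy
          exact hts y (by simpa using hy.2)
        · rw [List.any_eq_true]
          refine ⟨t, ht, ?_⟩
          rw [PySem.Set.equal_iff]
          intro y
          rw [PySem.Set.mem_ofList, List.mem_filter]
          constructor
          · rintro ⟨_, hy⟩; simpa using hy
          · intro hy; exact ⟨htz y hy, by simpa using hy⟩
    · rw [PySem.Set.mem_ofList, List.mem_filter]
      exact ⟨htz x hx, by simpa using hx⟩

-- Nodup of every member of the filtered power set
theorem pv_interior_nodup (z : List Int) (tau : List (List Int)) (s : List Int)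
    (p : PySem.Set Int)
    (hp : p ∈ (pvPowerSet z).filter
        (fun p => PySem.Set.issubset p s && tau.any (fun t => PySem.Set.equal p t))) :
    p.Nodup := by
  obtain ⟨c, _, rfl⟩ := (pv_mem_powerSet z p).1 (List.mem_filter.1 hp).1
  exact PySem.Set.nodup_ofList c

-- ===== VERDICT (by name: the statement is the Claim_ definition above) =====
theorem usual_interior_spec : Claim_equal_usual_interior := by
  intro z tau s _
  unfold Spec_usual_interior usual_interior usual_interior_alt
  cases hI : (pvPowerSet z).filter
      (fun p => PySem.Set.issubset p s && tau.any (fun t => PySem.Set.equal p t)) with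
  | nil =>
      have hB : tau.foldl
          (fun out t =>
            if PySem.Set.issubset t z && PySem.Set.issubset t s then PySem.Set.union out t
            else out) PySem.Set.empty = [] := by
        rw [List.eq_nil_iff_forall_not_mem]
        intro x hx
        rw [pv_mem_foldl_B] at hx
        rcases hx with hx | ⟨t, ht, hc, hx⟩
        · simp [PySem.Set.empty] at hx
        · obtain ⟨p, hp, _⟩ := (pv_interior_mem_iff z tau s x).2 ⟨t, ht, hc, hx⟩
          rw [hI] at hp
          simp at hp
      rw [hB]
      rfl
  | cons h rest =>
      rw [PySem.List.sorted_id_eq_sorted_id_iff_perm]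
      have hAnodup : (rest.foldl PySem.Set.union h).Nodup :=
        pv_nodup_foldl_union rest h
          (pv_interior_nodup z tau s h (hI ▸ List.mem_cons_self))
      have hBnodup := pv_nodup_foldl_B z s tau PySem.Set.empty List.nodup_nil
      rw [List.perm_ext_iff_of_nodup hAnodup hBnodup]
      intro x
      rw [pv_mem_foldl_union, pv_mem_foldl_B]
      have hA : (x ∈ h ∨ ∃ p ∈ rest, x ∈ p) ↔ ∃ p ∈ (pvPowerSet z).filter
          (fun p => PySem.Set.issubset p s && tau.any (fun t => PySem.Set.equal p t)), x ∈ p := by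
        rw [hI]; simp
      rw [hA, pv_interior_mem_iff]
      simp [PySem.Set.empty]
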